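-- pv_equiv track=rewrite | github.com/baeziy/daa-codes | ass01/task1/divideAndConquer.py | foo
-- ===== SOURCE A (Python) =====
-- def foo(L, p, r):
--     if (p == r):
--         if(p%2!=0):
--             if L[p] == 1:
--                 L[p] = 0
--             else:
--                 L[p] = 1
--         return L
--     else:
--         mid = (p+r)//2
--         left = foo(L, p, mid)
--         right = foo(L, mid + 1, r)
--     return L
-- ===== SOURCE B (Python) =====
-- def foo(L, p, r):
--     stack = [(p, r)]
--     while stack:
--         a, b = stack.pop()
--         if a == b:
--             if a % 2 != 0:
--                 L[a] = 0 if L[a] == 1 else 1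
--         else:
--             mid = (a + b) // 2
--             stack.append((mid + 1, b))
--             stack.append((a, mid))
--     return L
-- ===== Notes on version B (the rewrite author's own statement) =====
-- stated objective: alternative
-- what changed: Replaces the divide-and-conquer recursion with an iterative while loop driven by an explicit worklist stack of index intervals, flipping the value at each odd index when a singleton interval is popped.
import Mathlib
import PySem

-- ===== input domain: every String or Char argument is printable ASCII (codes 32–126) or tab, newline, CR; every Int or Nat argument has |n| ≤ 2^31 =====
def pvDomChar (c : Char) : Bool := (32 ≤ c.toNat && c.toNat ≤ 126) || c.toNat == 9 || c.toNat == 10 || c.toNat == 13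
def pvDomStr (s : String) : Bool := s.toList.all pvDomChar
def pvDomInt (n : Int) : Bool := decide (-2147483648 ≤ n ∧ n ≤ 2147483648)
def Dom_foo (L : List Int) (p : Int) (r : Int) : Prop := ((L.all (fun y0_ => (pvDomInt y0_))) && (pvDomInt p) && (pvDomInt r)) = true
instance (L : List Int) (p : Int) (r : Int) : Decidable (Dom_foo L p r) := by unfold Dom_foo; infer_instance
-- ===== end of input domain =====

-- B replaces A's divide-and-conquer recursion with an iterative while loop over an explicit
-- worklist stack of index intervals; both A and B mutate L in place and return the same list
-- object — the equivalence proved here is about the return value.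

-- ===== PORT A =====
-- L[p] = 0/1 toggle of the base case: pyGet? none = IndexError (excluded by Pre_foo).
def fooFlip (L : List Int) (p : Int) : List Int :=
  match PySem.List.pyGet? L p with
  | some v => PySem.List.pySetD L p (if v = 1 then 0 else 1)
  | none => L

-- midpoint bound cited by foo's termination proof
theorem pv_mid_lt (p r : Int) (h : p < r) : PySem.Int.floordiv (p + r) 2 < r := by
  have h1 := PySem.Int.floordiv_mul_add_mod (p + r) 2
  have h2 := PySem.Int.mod_eq_emod_of_pos (a := p + r) (b := 2) (by omega)
  omega

-- 'if p < r' is a totality guard only: on p > r the Python recurses forever (excluded by Pre_foo).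
def foo (L : List Int) (p : Int) (r : Int) : List Int :=
  if p = r then
    if PySem.Int.mod p 2 ≠ 0 then fooFlip L p else L
  else if hlt : p < r then
    foo (foo L p (PySem.Int.floordiv (p + r) 2)) (PySem.Int.floordiv (p + r) 2 + 1) r
  else L
termination_by (r - p).toNat
decreasing_by
  · have h2 := pv_mid_lt p r hlt
    omega
  · have h2 := (PySem.Int.floordiv_two_mid_bounds (le_of_lt hlt)).1
    omega

-- ===== PORT B =====
-- The while loop of Source B: the stack's head is its top (Python's list.pop takes the last
-- element; pushing (mid+1, b) then (a, mid) makes (a, mid) the next interval popped).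
-- The fuel argument is a totality guard only: 2*(r-p+1) steps always suffice when p ≤ r,
-- and on p > r the Python loop runs forever (excluded by Pre_foo).
def fooAltStep : Nat → List Int → List (Int × Int) → List Int
  | _, L, [] => L
  | 0, L, _ :: _ => L
  | Nat.succ f, L, (a, b) :: rest =>
    if a = b then
      fooAltStep f
        (if PySem.Int.mod a 2 ≠ 0 then
          PySem.List.pySetD L a (if PySem.List.pyGetD L a 0 = 1 then 0 else 1)
        else L) rest
    else
      fooAltStep f L
        ((a, PySem.Int.floordiv (a + b) 2) :: (PySem.Int.floordiv (a + b) 2 + 1, b) :: rest)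

def foo_alt (L : List Int) (p : Int) (r : Int) : List Int :=
  fooAltStep (2 * (r - p + 1).toNat) L [(p, r)]

-- ===== PRECONDITION & SPEC =====
-- Pre_foo: the inputs on which Python A returns — p ≤ r (on p > r A hits RecursionError) and,
-- if the inclusive range p..r contains an odd index at all, its first and last odd indices
-- (hence all of them) are valid — possibly negative — indices of L (otherwise A raises
-- IndexError at its base case).
def Pre_foo (L : List Int) (p : Int) (r : Int) : Prop :=
  p ≤ r ∧ ((if p % 2 = 0 then p + 1 else p) ≤ (if r % 2 = 0 then r - 1 else r) →
    PySem.Raise.InRange L.length (if p % 2 = 0 then p + 1 else p) ∧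
    PySem.Raise.InRange L.length (if r % 2 = 0 then r - 1 else r))
instance (L : List Int) (p : Int) (r : Int) : Decidable (Pre_foo L p r) := by
  unfold Pre_foo; infer_instance
def pvWitness_foo : List Int × Int × Int := ([1, 0, 1, 5], 0, 3)

def Spec_foo (L : List Int) (p : Int) (r : Int) (out : List Int) : Prop := out = foo_alt L p r
instance (L : List Int) (p : Int) (r : Int) (out : List Int) : Decidable (Spec_foo L p r out) := by
  unfold Spec_foo; infer_instance

-- ===== CLAIM (what is proved, stated in full; the proofs are below) =====
def Claim_equal_foo : Prop := ∀ (L : List Int) (p : Int) (r : Int), Dom_foo L p r → Pre_foo L p r → Spec_foo L p r (foo L p r)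

-- ===== LEMMAS AND PROOFS =====

-- proof-only normal form: the flip of one index, and the left-to-right sweep of an interval
def segFlip (acc : List Int) (i : Int) : List Int :=
  if PySem.Int.mod i 2 ≠ 0 then
    PySem.List.pySetD acc i (if PySem.List.pyGetD acc i 0 = 1 then 0 else 1)
  else acc

def seg (L : List Int) (a b : Int) : List Int :=
  (PySem.List.pyRange a (b + 1) 1).foldl segFlip L

-- A's base-case flip equals segFlip (in range they set the same value; out of range
-- pyGet? is none and pySetD is the identity, so both return L).
theorem fooFlip_eq_segFlip (L : List Int) (p : Int) :
    (if PySem.Int.mod p 2 ≠ 0 then fooFlip L p else L) = segFlip L p := by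
  unfold segFlip
  by_cases hodd : PySem.Int.mod p 2 ≠ 0
  · rw [if_pos hodd, if_pos hodd]
    unfold fooFlip
    rcases h : PySem.List.pyGet? L p with _ | v
    · simp [PySem.List.pySetD, (PySem.List.pySet?_eq_none_iff L p _).mpr
        ((PySem.List.pyGet?_eq_none_iff L p).mp h)]
    · simp [PySem.List.pyGetD, h]
  · rw [if_neg hodd, if_neg hodd]

theorem seg_single (L : List Int) (a : Int) : seg L a a = segFlip L a := by
  unfold seg
  rw [PySem.List.pyRange_one_singleton]
  rfl

theorem seg_append (L : List Int) (a m b : Int) (h1 : a ≤ m + 1) (h2 : m ≤ b) :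
    seg (seg L a m) (m + 1) b = seg L a b := by
  unfold seg
  rw [← List.foldl_append,
      ← PySem.List.pyRange_one_append a (m + 1) (b + 1) h1 (by omega)]

-- A on p ≤ r sweeps the interval left to right (strong induction on r - p).
theorem foo_eq_seg (n : Nat) (L : List Int) (p r : Int) (hpr : p ≤ r)
    (hn : (r - p).toNat ≤ n) : foo L p r = seg L p r := by
  induction n generalizing L p r with
  | zero =>
    have hp : p = r := by omega
    subst hp
    rw [foo, if_pos rfl, seg_single, fooFlip_eq_segFlip]
  | succ n ih =>
    by_cases hp : p = r
    · subst hp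
      rw [foo, if_pos rfl, seg_single, fooFlip_eq_segFlip]
    · have hlt : p < r := lt_of_le_of_ne hpr hp
      have hmid := PySem.Int.floordiv_two_mid_bounds hpr
      have hmlt : PySem.Int.floordiv (p + r) 2 < r := pv_mid_lt p r hlt
      rw [foo]
      simp only [if_neg hp, dif_pos hlt]
      rw [ih L p (PySem.Int.floordiv (p + r) 2) hmid.1 (by omega),
          ih _ (PySem.Int.floordiv (p + r) 2 + 1) r (by omega) (by omega),
          seg_append L p (PySem.Int.floordiv (p + r) 2) r (by omega) (by omega)]

theorem fooAltStep_nil (f : Nat) (L : List Int) : fooAltStep f L [] = L := by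
  cases f <;> rfl

-- B's loop, started on an interval with enough fuel, sweeps that interval and proceeds
-- with the rest of the stack, consuming exactly 2*(b-a+1)-1 steps (strong induction on b - a).
theorem fooAltStep_run (n : Nat) (a b : Int) (L : List Int) (rest : List (Int × Int))
    (f : Nat) (hab : a ≤ b) (hn : (b - a).toNat ≤ n) (hf : 2 * (b - a + 1).toNat ≤ f) :
    fooAltStep f L ((a, b) :: rest) =
      fooAltStep (f - (2 * (b - a + 1).toNat - 1)) (seg L a b) rest := by
  induction n generalizing a b L rest f with
  | zero =>
    have hp : a = b := by omega
    subst hp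
    obtain ⟨f', rfl⟩ : ∃ f', f = f' + 1 := ⟨f - 1, by omega⟩
    rw [fooAltStep, if_pos rfl]
    show fooAltStep f' (segFlip L a) rest = _
    rw [← seg_single]
    congr 1
    omega
  | succ n ih =>
    by_cases hp : a = b
    · subst hp
      obtain ⟨f', rfl⟩ : ∃ f', f = f' + 1 := ⟨f - 1, by omega⟩
      rw [fooAltStep, if_pos rfl]
      show fooAltStep f' (segFlip L a) rest = _
      rw [← seg_single]
      congr 1
      omega
    · have hlt : a < b := lt_of_le_of_ne hab hp
      have hmid := PySem.Int.floordiv_two_mid_bounds hab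
      have hmlt : PySem.Int.floordiv (a + b) 2 < b := pv_mid_lt a b hlt
      obtain ⟨f', rfl⟩ : ∃ f', f = f' + 1 := ⟨f - 1, by omega⟩
      rw [fooAltStep, if_neg hp]
      rw [ih a (PySem.Int.floordiv (a + b) 2) L _ f' hmid.1 (by omega) (by omega)]
      rw [ih (PySem.Int.floordiv (a + b) 2 + 1) b _ rest _ (by omega) (by omega) (by omega)]
      rw [seg_append L a (PySem.Int.floordiv (a + b) 2) b (by omega) (by omega)]
      congr 1
      omega

-- ===== VERDICT (by name: the statement is the Claim_ definition above) =====
theorem foo_spec : Claim_equal_foo := by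
  intro L p r _ hpre
  unfold Spec_foo foo_alt
  rw [fooAltStep_run (r - p).toNat p r L [] (2 * (r - p + 1).toNat) hpre.1 le_rfl le_rfl,
      fooAltStep_nil, foo_eq_seg (r - p).toNat L p r hpre.1 le_rfl]
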